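-- pv_equiv track=rewrite | github.com/hereisdavidgan/KNIFE | leetcode/DATA STRUCTURE/05Tuesday.py | have_same
-- ===== SOURCE A (Python) =====
-- def have_same(res):
--     tmp = []
--     for i in res:
--         if i in tmp and i != '.':
--             return True
--         else:
--             tmp.append(i)
--     return False
-- ===== SOURCE B (Python) =====
-- def have_same(res):
--     vals = [x for x in res if x != '.']
--     return len(vals) != len(set(vals))
-- ===== Notes on version B (the rewrite author's own statement) =====
-- stated objective: idiomatic
-- what changed: Replaced the incremental scan with a growing seen-list, per-element membership test and early return by a filter of the non-'.' values followed by a set-size comparison (len(vals) != len(set(vals))).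
import Mathlib
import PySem

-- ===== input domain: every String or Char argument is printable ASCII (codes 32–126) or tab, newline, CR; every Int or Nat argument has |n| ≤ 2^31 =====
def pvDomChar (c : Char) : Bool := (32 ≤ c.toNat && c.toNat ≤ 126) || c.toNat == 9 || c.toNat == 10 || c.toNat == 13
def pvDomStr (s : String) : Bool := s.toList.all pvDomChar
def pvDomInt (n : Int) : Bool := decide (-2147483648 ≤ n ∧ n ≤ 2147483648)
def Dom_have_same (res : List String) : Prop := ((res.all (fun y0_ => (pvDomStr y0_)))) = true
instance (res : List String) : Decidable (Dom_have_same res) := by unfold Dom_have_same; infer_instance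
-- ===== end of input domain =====

-- B filters out '.' and compares list length with set size, replacing A's growing seen-list scan with early return (idiomatic rewrite).

-- ===== PORT A =====
-- the for-loop with early return, as structural recursion over res carrying tmp
def have_same_go (tmp : List String) (res : List String) : Bool :=
  match res with
  | [] => false
  | i :: rest =>
    if tmp.contains i && i != "." then true
    else have_same_go (tmp ++ [i]) rest

def have_same (res : List String) : Bool := have_same_go [] res

-- ===== PORT B =====
def have_same_alt (res : List String) : Bool :=
  let vals := res.filter (fun x => x != ".")
  vals.length != (PySem.Set.ofList vals).length

-- ===== PRECONDITION & SPEC =====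
def Spec_have_same (res : List String) (out : Bool) : Prop := out = have_same_alt res
instance (res : List String) (out : Bool) : Decidable (Spec_have_same res out) := by unfold Spec_have_same; infer_instance

-- ===== CLAIM (what is proved, stated in full; the proofs are below) =====
def Claim_equal_have_same : Prop := ∀ (res : List String), Dom_have_same res → Spec_have_same res (have_same res)

-- ===== LEMMAS AND PROOFS =====

-- set(xs) keeps first occurrences, so building it by folding add is a sublist of seed ++ input
theorem foldl_add_sublist (xs : List String) (s : List String) :
    List.Sublist (xs.foldl PySem.Set.add s) (s ++ xs) := by
  induction xs generalizing s with
  | nil => simp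
  | cons x xs ih =>
    have h1 := ih (PySem.Set.add s x)
    have h2 : List.Sublist (PySem.Set.add s x ++ xs) (s ++ x :: xs) := by
      have : List.Sublist (PySem.Set.add s x) (s ++ [x]) := by
        unfold PySem.Set.add
        split
        · exact List.sublist_append_left s [x]
        · simp
      simpa using this.append_right xs
    exact List.foldl_cons .. ▸ h1.trans h2

theorem ofList_sublist (xs : List String) :
    List.Sublist (PySem.Set.ofList xs) xs := by
  simpa using foldl_add_sublist xs []

theorem length_ofList_eq_iff_nodup (xs : List String) :
    (PySem.Set.ofList xs).length = xs.length ↔ xs.Nodup := by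
  constructor
  · intro h
    have he := (ofList_sublist xs).eq_of_length h
    exact he ▸ PySem.Set.nodup_ofList xs
  · intro h
    rw [PySem.Set.ofList_eq_self_of_nodup xs h]

-- characterisation of A's loop: true iff some non-'.' element is already in tmp or repeats later
theorem have_same_go_eq (res tmp : List String) :
    have_same_go tmp res =
      ((res.filter (fun x => x != ".")).any (fun x => tmp.contains x)
        || !decide (res.filter (fun x => x != ".")).Nodup) := by
  induction res generalizing tmp with
  | nil => simp [have_same_go]
  | cons i rest ih =>
    rw [have_same_go]
    by_cases hc : (tmp.contains i && (i != ".")) = true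
    · rw [if_pos hc]
      simp only [Bool.and_eq_true, bne_iff_ne, List.contains_iff_mem] at hc
      symm
      simp [hc.1, hc.2]
    · rw [if_neg hc, ih]
      simp only [Bool.and_eq_true, bne_iff_ne, List.contains_iff_mem, not_and] at hc
      by_cases hdot : i = "."
      · subst hdot
        rw [Bool.eq_iff_iff]
        simp [List.mem_append]
        constructor
        · rintro (⟨x, hx, hne, (h | h)⟩ | h)
          · exact Or.inl ⟨x, hx, hne, h⟩
          · exact absurd h hne
          · exact Or.inr h
        · rintro (⟨x, hx, hne, h⟩ | h)
          · exact Or.inl ⟨x, hx, hne, Or.inl h⟩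
          · exact Or.inr h
      · have hnm : i ∉ tmp := fun h => (hc h) hdot
        rw [Bool.eq_iff_iff]
        simp [hdot, List.mem_filter, List.mem_append, List.nodup_cons]
        constructor
        · rintro (⟨x, hx, hne, (h | h)⟩ | h)
          · exact Or.inl (Or.inr ⟨x, hx, hne, h⟩)
          · exact h ▸ Or.inr (Or.inl hx)
          · exact Or.inr (Or.inr h)
        · rintro ((h | ⟨x, hx, hne, h⟩) | h | h)
          · exact absurd h hnm
          · exact Or.inl ⟨x, hx, hne, Or.inl h⟩
          · exact Or.inl ⟨i, h, hdot, Or.inr rfl⟩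
          · exact Or.inr h

-- ===== VERDICT (by name: the statement is the Claim_ definition above) =====
theorem have_same_spec : Claim_equal_have_same := by
  intro res _
  unfold Spec_have_same have_same have_same_alt
  rw [have_same_go_eq]
  set vals := res.filter (fun x => x != ".") with hv
  have h := length_ofList_eq_iff_nodup vals
  have key : (vals.length != (PySem.Set.ofList vals).length) = !decide vals.Nodup := by
    by_cases hn : vals.Nodup
    · simp [hn, h.2 hn]
    · have hne : vals.length ≠ (PySem.Set.ofList vals).length := fun he => hn (h.1 he.symm)
      simp [hn, hne]
  rw [key]
  have hz : vals.any (fun x => ([] : List String).contains x) = false := by simp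
  rw [hz, Bool.false_or]
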